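-- pv_equiv track=rewrite | github.com/m-relm/AoC | Day-02/day2-d.py | do_all_differences_decrease
-- ===== SOURCE A (Python) =====
-- def do_all_differences_decrease(differences: [int]):
--     for difference in differences:
--         if difference < 0:
--             if difference > -4:
--                 var = True
--             else:
--                 return False
--         else:
--             return False
--     return True
-- ===== SOURCE B (Python) =====
-- def do_all_differences_decrease(differences: [int]):
--     # an int lies strictly between -4 and 0 iff it is -1, -2 or -3
--     return len(differences) == (differences.count(-1)
--                                 + differences.count(-2)
--                                 + differences.count(-3))
-- ===== Notes on version B (the rewrite author's own statement) =====
-- stated objective: alternative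
-- what changed: B replaces the early-exit per-element scan by counting: since an int lies strictly between -4 and 0 iff it is -1, -2 or -3, B returns len(differences) == count(-1)+count(-2)+count(-3).
import Mathlib
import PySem

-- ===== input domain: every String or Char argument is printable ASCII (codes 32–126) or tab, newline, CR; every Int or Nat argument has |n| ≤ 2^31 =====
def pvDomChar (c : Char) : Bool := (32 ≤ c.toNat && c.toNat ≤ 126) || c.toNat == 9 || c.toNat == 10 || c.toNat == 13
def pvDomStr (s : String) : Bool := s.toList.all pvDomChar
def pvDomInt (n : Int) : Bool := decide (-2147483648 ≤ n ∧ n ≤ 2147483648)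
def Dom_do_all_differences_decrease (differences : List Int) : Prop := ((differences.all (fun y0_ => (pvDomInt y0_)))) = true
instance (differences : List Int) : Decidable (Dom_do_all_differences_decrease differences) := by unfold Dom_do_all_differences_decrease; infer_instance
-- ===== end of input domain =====

-- B replaces the early-exit scan by counting: an int lies strictly between -4 and 0 iff it is -1, -2 or -3,
-- so B compares the list length with count(-1)+count(-2)+count(-3).
-- ===== PORT A =====
def do_all_differences_decrease (differences : List Int) : Bool :=
  match differences with
  | [] => true
  | difference :: rest =>
    if difference < 0 then
      if difference > -4 then do_all_differences_decrease rest
      else false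
    else false

-- ===== PORT B =====
def do_all_differences_decrease_alt (differences : List Int) : Bool :=
  decide (differences.length =
    PySem.List.count differences (-1)
    + PySem.List.count differences (-2)
    + PySem.List.count differences (-3))

-- ===== PRECONDITION & SPEC =====
def Spec_do_all_differences_decrease (differences : List Int) (out : Bool) : Prop := out = do_all_differences_decrease_alt differences
instance (differences : List Int) (out : Bool) : Decidable (Spec_do_all_differences_decrease differences out) := by unfold Spec_do_all_differences_decrease; infer_instance

-- ===== CLAIM (what is proved, stated in full; the proofs are below) =====
def Claim_equal_do_all_differences_decrease : Prop := ∀ (differences : List Int), Dom_do_all_differences_decrease differences → Spec_do_all_differences_decrease differences (do_all_differences_decrease differences)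

-- ===== LEMMAS AND PROOFS =====

theorem a_iff (differences : List Int) :
    do_all_differences_decrease differences = true ↔
      ∀ x ∈ differences, x < 0 ∧ x > -4 := by
  induction differences with
  | nil => simp [do_all_differences_decrease]
  | cons d t ih =>
    simp only [do_all_differences_decrease, List.mem_cons]
    split_ifs with h1 h2
    · rw [ih]
      constructor
      · rintro hall x (rfl | hx)
        · exact ⟨h1, h2⟩
        · exact hall x hx
      · intro hall x hx; exact hall x (Or.inr hx)
    · simp only [false_iff]
      intro hall; exact h2 (hall d (Or.inl rfl)).2
    · simp only [false_iff]
      intro hall; exact h1 (hall d (Or.inl rfl)).1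

theorem count_sum_eq_countP (l : List Int) :
    l.count (-1) + l.count (-2) + l.count (-3) =
      l.countP (fun x => x == -1 || x == -2 || x == -3) := by
  induction l with
  | nil => simp
  | cons d t ih =>
    by_cases h1 : d = (-1 : Int) <;> by_cases h2 : d = (-2 : Int) <;>
      by_cases h3 : d = (-3 : Int) <;>
      simp [h1, h2, h3, List.count_cons, List.countP_cons, ← ih] <;> omega

theorem alt_iff (differences : List Int) :
    do_all_differences_decrease_alt differences = true ↔
      ∀ x ∈ differences, x < 0 ∧ x > -4 := by
  simp only [do_all_differences_decrease_alt, PySem.List.count_eq, decide_eq_true_eq,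
    count_sum_eq_countP]
  rw [eq_comm, List.countP_eq_length]
  constructor
  · intro h x hx
    have := h x hx
    simp only [Bool.or_eq_true, beq_iff_eq] at this
    omega
  · intro h x hx
    have := h x hx
    simp only [Bool.or_eq_true, beq_iff_eq]
    omega

-- ===== VERDICT (by name: the statement is the Claim_ definition above) =====
theorem do_all_differences_decrease_spec : Claim_equal_do_all_differences_decrease := by
  intro differences _
  unfold Spec_do_all_differences_decrease
  exact Bool.eq_iff_iff.mpr (by rw [a_iff, alt_iff])
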